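-- pv_equiv track=rewrite | github.com/TakaIshikawa/blueprint | src/blueprint/task_audit_evidence_readiness.py | _missing_artifacts
-- ===== SOURCE A (Python) =====
-- from typing import Any, Iterable, Literal, Mapping, TypeVar
--
-- AuditEvidenceSignal = Literal[
--     "audit_review",
--     "compliance_review",
--     "security_review",
--     "migration_change",
--     "rollout_change",
--     "approval_gate",
-- ]
--
-- AuditEvidenceArtifact = Literal[
--     "compliance_evidence",
--     "screenshot_evidence",
--     "log_evidence",
--     "test_report",
--     "approval_record",
--     "migration_proof",
--     "rollout_proof",
--     "security_review_artifact",
-- ]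
--
-- _ARTIFACT_ORDER: tuple[AuditEvidenceArtifact, ...] = (
--     "compliance_evidence",
--     "screenshot_evidence",
--     "log_evidence",
--     "test_report",
--     "approval_record",
--     "migration_proof",
--     "rollout_proof",
--     "security_review_artifact",
-- )
--
-- def _missing_artifacts(
--     signal_set: set[AuditEvidenceSignal],
--     present_set: set[AuditEvidenceArtifact],
-- ) -> tuple[AuditEvidenceArtifact, ...]:
--     recommended: set[AuditEvidenceArtifact] = set()
--     if "audit_review" in signal_set:
--         recommended.update({"compliance_evidence", "log_evidence", "test_report", "approval_record"})
--     if "compliance_review" in signal_set: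
--         recommended.update({"compliance_evidence", "test_report", "approval_record"})
--     if "security_review" in signal_set:
--         recommended.update({"security_review_artifact", "test_report", "approval_record"})
--     if "migration_change" in signal_set:
--         recommended.update({"migration_proof", "log_evidence", "test_report", "approval_record"})
--     if "rollout_change" in signal_set:
--         recommended.update({"rollout_proof", "log_evidence", "test_report"})
--     if "approval_gate" in signal_set:
--         recommended.add("approval_record")
--     if present_set and not recommended:
--         recommended.update(present_set)
--     return tuple(artifact for artifact in _ARTIFACT_ORDER if artifact in recommended and artifact not in present_set)
-- ===== SOURCE B (Python) =====
-- # Inverted index: for each artifact (in output order), the signals that trigger it.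
-- # No 'recommended' set is built; each artifact is emitted iff some trigger is active
-- # and it is not already present.  A's 'if present_set and not recommended' fallback is
-- # omitted: it only adds artifacts already present, which the final filter removes.
-- _TRIGGERED_BY = (
--     ("compliance_evidence", ("audit_review", "compliance_review")),
--     ("screenshot_evidence", ()),
--     ("log_evidence", ("audit_review", "migration_change", "rollout_change")),
--     ("test_report", ("audit_review", "compliance_review", "security_review",
--                      "migration_change", "rollout_change")),
--     ("approval_record", ("audit_review", "compliance_review", "security_review",
--                          "migration_change", "approval_gate")),
--     ("migration_proof", ("migration_change",)),
--     ("rollout_proof", ("rollout_change",)),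
--     ("security_review_artifact", ("security_review",)),
-- )
--
-- def _missing_artifacts(signal_set, present_set):
--     return tuple(
--         artifact
--         for artifact, triggers in _TRIGGERED_BY
--         if artifact not in present_set and any(s in signal_set for s in triggers)
--     )
-- ===== Notes on version B (the rewrite author's own statement) =====
-- stated objective: alternative
-- what changed: Inverts the data flow: instead of building a recommended set from a six-branch per-signal if-chain and then filtering the artifact order, B keeps an artifact-to-triggering-signals inverted index and emits each artifact in one comprehension iff some trigger signal is active and it is absent (A's present_set fallback is dropped: it only adds artifacts the final filter removes).
import Mathlib
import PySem

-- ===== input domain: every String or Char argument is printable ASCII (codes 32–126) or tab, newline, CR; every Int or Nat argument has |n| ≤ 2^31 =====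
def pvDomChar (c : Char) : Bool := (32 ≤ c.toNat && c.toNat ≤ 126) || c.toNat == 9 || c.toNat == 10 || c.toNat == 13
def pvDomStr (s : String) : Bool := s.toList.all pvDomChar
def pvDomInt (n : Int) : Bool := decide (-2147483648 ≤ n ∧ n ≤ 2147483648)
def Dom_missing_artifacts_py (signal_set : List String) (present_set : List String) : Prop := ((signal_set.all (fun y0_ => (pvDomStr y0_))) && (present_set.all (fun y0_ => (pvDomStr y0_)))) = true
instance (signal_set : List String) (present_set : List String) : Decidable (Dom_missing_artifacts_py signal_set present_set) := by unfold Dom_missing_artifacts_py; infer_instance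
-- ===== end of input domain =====

-- B inverts the data flow: an artifact→triggering-signals index scanned once per
-- artifact replaces A's per-signal if-chain building a recommended set (A's no-op
-- present_set fallback is dropped); same cost, a different decomposition.

-- ===== PORT A =====
def artifactOrder : List String :=
  ["compliance_evidence", "screenshot_evidence", "log_evidence", "test_report",
   "approval_record", "migration_proof", "rollout_proof", "security_review_artifact"]

-- the six 'if … in signal_set: recommended.update(…)' branches of A
def recommendedA (signal_set : List String) : PySem.Set String :=
  let r : PySem.Set String := PySem.Set.empty
  let r := if "audit_review" ∈ signal_set then
      PySem.Set.update r ["compliance_evidence", "log_evidence", "test_report", "approval_record"] else r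
  let r := if "compliance_review" ∈ signal_set then
      PySem.Set.update r ["compliance_evidence", "test_report", "approval_record"] else r
  let r := if "security_review" ∈ signal_set then
      PySem.Set.update r ["security_review_artifact", "test_report", "approval_record"] else r
  let r := if "migration_change" ∈ signal_set then
      PySem.Set.update r ["migration_proof", "log_evidence", "test_report", "approval_record"] else r
  let r := if "rollout_change" ∈ signal_set then
      PySem.Set.update r ["rollout_proof", "log_evidence", "test_report"] else r
  let r := if "approval_gate" ∈ signal_set then
      PySem.Set.add r "approval_record" else r
  r

def missing_artifacts_py (signal_set : List String) (present_set : List String) : List String :=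
  let recommended := recommendedA signal_set
  let recommended :=
    if present_set ≠ [] ∧ recommended = [] then PySem.Set.update recommended present_set
    else recommended
  artifactOrder.filter (fun a => PySem.Set.contains recommended a && !(present_set.contains a))

-- ===== PORT B =====
-- the module-level tuple _TRIGGERED_BY of Source B (artifact → signals that trigger it)
def triggeredBy : List (String × List String) :=
  [("compliance_evidence", ["audit_review", "compliance_review"]),
   ("screenshot_evidence", []),
   ("log_evidence", ["audit_review", "migration_change", "rollout_change"]),
   ("test_report", ["audit_review", "compliance_review", "security_review",
                    "migration_change", "rollout_change"]),
   ("approval_record", ["audit_review", "compliance_review", "security_review",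
                        "migration_change", "approval_gate"]),
   ("migration_proof", ["migration_change"]),
   ("rollout_proof", ["rollout_change"]),
   ("security_review_artifact", ["security_review"])]

def missing_artifacts_py_alt (signal_set : List String) (present_set : List String) : List String :=
  (triggeredBy.filter (fun p =>
      !(present_set.contains p.1) && p.2.any (fun s => signal_set.contains s))).map Prod.fst

-- ===== PRECONDITION & SPEC =====
def Spec_missing_artifacts_py (signal_set : List String) (present_set : List String) (out : List String) : Prop := out = missing_artifacts_py_alt signal_set present_set
instance (signal_set : List String) (present_set : List String) (out : List String) : Decidable (Spec_missing_artifacts_py signal_set present_set out) := by unfold Spec_missing_artifacts_py; infer_instance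

-- ===== CLAIM (what is proved, stated in full; the proofs are below) =====
def Claim_equal_missing_artifacts_py : Prop := ∀ (signal_set : List String) (present_set : List String), Dom_missing_artifacts_py signal_set present_set → Spec_missing_artifacts_py signal_set present_set (missing_artifacts_py signal_set present_set)

-- ===== LEMMAS AND PROOFS =====

-- "which signals recommend artifact a, and is one of them in signal_set"
def inRec (signal_set : List String) (a : String) : Prop :=
  ("audit_review" ∈ signal_set ∧ a ∈ (["compliance_evidence", "log_evidence", "test_report", "approval_record"] : List String)) ∨
  ("compliance_review" ∈ signal_set ∧ a ∈ (["compliance_evidence", "test_report", "approval_record"] : List String)) ∨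
  ("security_review" ∈ signal_set ∧ a ∈ (["security_review_artifact", "test_report", "approval_record"] : List String)) ∨
  ("migration_change" ∈ signal_set ∧ a ∈ (["migration_proof", "log_evidence", "test_report", "approval_record"] : List String)) ∨
  ("rollout_change" ∈ signal_set ∧ a ∈ (["rollout_proof", "log_evidence", "test_report"] : List String)) ∨
  ("approval_gate" ∈ signal_set ∧ a = "approval_record")

lemma mem_if_update (c : Prop) [Decidable c] (r : PySem.Set String) (L : List String) (a : String) :
    (a ∈ (if c then PySem.Set.update r L else r)) ↔ (a ∈ r ∨ (c ∧ a ∈ L)) := by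
  split_ifs with h <;> simp [PySem.Set.mem_update, h]

lemma mem_if_add (c : Prop) [Decidable c] (r : PySem.Set String) (x : String) (a : String) :
    (a ∈ (if c then PySem.Set.add r x else r)) ↔ (a ∈ r ∨ (c ∧ a = x)) := by
  split_ifs with h <;> simp [PySem.Set.mem_add, h]

lemma mem_recommendedA (signal_set : List String) (a : String) :
    a ∈ recommendedA signal_set ↔ inRec signal_set a := by
  unfold recommendedA inRec
  simp only [mem_if_add, mem_if_update, PySem.Set.empty, List.not_mem_nil, false_or]
  tauto

-- if no artifact is recommended, none of the six signals is in signal_set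
lemma no_signals (ss : List String) (h : recommendedA ss = []) :
    "audit_review" ∉ ss ∧ "compliance_review" ∉ ss ∧ "security_review" ∉ ss ∧
    "migration_change" ∉ ss ∧ "rollout_change" ∉ ss ∧ "approval_gate" ∉ ss := by
  have h1 := mem_recommendedA ss "test_report"
  have h2 := mem_recommendedA ss "approval_record"
  rw [h] at h1 h2
  simp only [List.not_mem_nil, false_iff, inRec, List.mem_cons, List.not_mem_nil] at h1 h2
  push Not at h1 h2
  exact ⟨fun hm => (h1.1 hm).2.2.1, fun hm => (h1.2.1 hm).2.1,
    fun hm => (h1.2.2.1 hm).2.1, fun hm => (h1.2.2.2.1 hm).2.2.1,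
    fun hm => (h1.2.2.2.2.1 hm).2.2.1, fun hm => h2.2.2.2.2.2 hm⟩

-- ===== VERDICT (by name: the statement is the Claim_ definition above) =====
theorem missing_artifacts_py_spec : Claim_equal_missing_artifacts_py := by
  intro ss ps _
  unfold Spec_missing_artifacts_py missing_artifacts_py missing_artifacts_py_alt
  have horder : artifactOrder = triggeredBy.map Prod.fst := by rfl
  rw [horder, List.filter_map]
  apply congrArg
  apply List.filter_congr
  intro p hp
  simp only [Function.comp]
  by_cases hf : ps ≠ [] ∧ recommendedA ss = []
  · rw [if_pos hf]
    obtain ⟨n1, n2, n3, n4, n5, n6⟩ := no_signals ss hf.2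
    rw [hf.2, Bool.eq_iff_iff]
    simp only [Bool.and_eq_true, Bool.not_eq_true', PySem.Set.contains_iff,
      PySem.Set.mem_update, List.not_mem_nil, false_or, List.any_eq_true,
      List.contains_eq_mem, decide_eq_true_eq, decide_eq_false_iff_not]
    constructor
    · rintro ⟨hmem, hnot⟩; exact absurd hmem hnot
    · rintro ⟨-, s', hs', hss⟩
      fin_cases hp <;> simp at hs' <;>
        first
          | exact absurd hss (hs' ▸ n1)
          | (rcases hs' with rfl | rfl | rfl | rfl | rfl <;> tauto)
  · rw [if_neg hf, Bool.and_comm]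
    congr 1
    rw [Bool.eq_iff_iff, PySem.Set.contains_iff, mem_recommendedA]
    simp only [List.any_eq_true, List.contains_eq_mem, decide_eq_true_eq]
    fin_cases hp <;> simp [inRec] <;> tauto
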